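-- pv_equiv track=rewrite | github.com/MrBrantCode/unitest_baseline | mut_generate/mist_train_cf/cf_49021/solution.py | custom_mix_strings
-- ===== SOURCE A (Python) =====
-- def custom_mix_strings(s1: str, s2: str) -> str:
--     if len(s1) == len(s2):
--         mixed_string = "".join([s1[i] + s2[i] for i in range(len(s1))])
--     elif len(s1) > len(s2):
--         mixed_string = "".join([s1[i] + s2[i] for i in range(len(s2))]) + s1[len(s2):]
--     else:
--         mixed_string = "".join([s2[i] + s1[i] for i in range(len(s1))]) + s2[len(s1):]
--     return mixed_string[::-1]
-- ===== SOURCE B (Python) =====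
-- def custom_mix_strings(s1: str, s2: str) -> str:
--     a, b = (s1, s2) if len(s1) >= len(s2) else (s2, s1)
--     out = []
--     i = len(a) - 1
--     while i >= len(b):
--         out.append(a[i])
--         i -= 1
--     while i >= 0:
--         out.append(b[i])
--         out.append(a[i])
--         i -= 1
--     return "".join(out)
-- ===== Notes on version B (the rewrite author's own statement) =====
-- stated objective: alternative
-- what changed: B builds the reversed result directly back-to-front with two descending-index while loops (leftover tail of the longer string first, then shorter-char/longer-char pairs), eliminating A's interleave-comprehensions, slicing and final [::-1] reverse.
import Mathlib
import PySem

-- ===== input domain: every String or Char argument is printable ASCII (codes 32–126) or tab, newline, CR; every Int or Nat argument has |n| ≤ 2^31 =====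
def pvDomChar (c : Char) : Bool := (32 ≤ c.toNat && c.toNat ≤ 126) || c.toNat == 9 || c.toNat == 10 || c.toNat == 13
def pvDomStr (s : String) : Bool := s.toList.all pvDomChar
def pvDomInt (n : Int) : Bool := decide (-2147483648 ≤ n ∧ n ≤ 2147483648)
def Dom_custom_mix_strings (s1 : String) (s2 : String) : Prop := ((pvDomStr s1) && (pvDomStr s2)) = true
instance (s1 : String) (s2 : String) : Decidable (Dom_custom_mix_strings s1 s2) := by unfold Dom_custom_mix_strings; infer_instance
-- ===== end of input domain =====

-- B builds the reversed result directly back-to-front with two descending-index loops,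
-- replacing A's interleave-then-reverse with slicing; same cost (objective: alternative).

-- ===== PORT A =====
-- literal port of A: three length branches, index comprehensions joined by "", tail slice, [::-1]
def custom_mix_strings (s1 : String) (s2 : String) : String :=
  let mixed : List Char :=
    if s1.toList.length = s2.toList.length then
      PySem.Chars.join []
        ((PySem.List.pyRange 0 (s1.toList.length : Int) 1).map
          (fun i => [PySem.List.pyGetD s1.toList i ' ', PySem.List.pyGetD s2.toList i ' ']))
    else if s2.toList.length < s1.toList.length then
      PySem.Chars.join []
        ((PySem.List.pyRange 0 (s2.toList.length : Int) 1).map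
          (fun i => [PySem.List.pyGetD s1.toList i ' ', PySem.List.pyGetD s2.toList i ' ']))
        ++ PySem.List.slice s1.toList (some (s2.toList.length : Int)) none
    else
      PySem.Chars.join []
        ((PySem.List.pyRange 0 (s1.toList.length : Int) 1).map
          (fun i => [PySem.List.pyGetD s2.toList i ' ', PySem.List.pyGetD s1.toList i ' ']))
        ++ PySem.List.slice s2.toList (some (s1.toList.length : Int)) none
  String.ofList ((PySem.List.slice? mixed none none (-1)).getD [])

-- ===== PORT B =====
-- first while loop: i runs from len(a)-1 down while i >= len(b), appending a[i];
-- recursion on j = i+1 (stop when j ≤ m)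
def pvDown1 (a : List Char) (m : Nat) : Nat → List Char
  | 0 => []
  | j+1 => if j + 1 ≤ m then [] else a.getD j ' ' :: pvDown1 a m j

-- second while loop: i runs from len(b)-1 down to 0, appending b[i] then a[i]; recursion on j = i+1
def pvDown2 (a : List Char) (b : List Char) : Nat → List Char
  | 0 => []
  | j+1 => b.getD j ' ' :: a.getD j ' ' :: pvDown2 a b j

def custom_mix_strings_alt (s1 : String) (s2 : String) : String :=
  let a := if s2.toList.length ≤ s1.toList.length then s1.toList else s2.toList
  let b := if s2.toList.length ≤ s1.toList.length then s2.toList else s1.toList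
  String.ofList (pvDown1 a b.length a.length ++ pvDown2 a b b.length)

-- ===== PRECONDITION & SPEC =====
def Spec_custom_mix_strings (s1 : String) (s2 : String) (out : String) : Prop := out = custom_mix_strings_alt s1 s2
instance (s1 : String) (s2 : String) (out : String) : Decidable (Spec_custom_mix_strings s1 s2 out) := by unfold Spec_custom_mix_strings; infer_instance

-- ===== CLAIM =====
def Claim_equal_custom_mix_strings : Prop := ∀ (s1 : String) (s2 : String), Dom_custom_mix_strings s1 s2 → Spec_custom_mix_strings s1 s2 (custom_mix_strings s1 s2)

-- ===== LEMMAS AND PROOFS =====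

theorem pv_join_nil_flatten (l : List (List Char)) : PySem.Chars.join [] l = l.flatten := by
  show [].intercalate l = l.flatten
  induction l with
  | nil => rfl
  | cons a t ih =>
    cases t with
    | nil => simp [List.intercalate]
    | cons b t' => simp_all [List.intercalate, List.intersperse]

-- the pyRange/pyGetD comprehension over indices 0..n-1 in List.range form
theorem pv_map_range (p q : List Char) (n : Nat) :
    (PySem.List.pyRange 0 (n : Int) 1).map
        (fun i => [PySem.List.pyGetD p i ' ', PySem.List.pyGetD q i ' ']) =
      (List.range n).map (fun k => [p.getD k ' ', q.getD k ' ']) := by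
  rw [PySem.List.pyRange_zero_nat]
  simp [List.map_map, Function.comp_def]

-- the first loop yields the reverse of a[m:j]
theorem pvDown1_eq (a : List Char) (m : Nat) :
    ∀ j, j ≤ a.length → pvDown1 a m j = ((a.take j).drop m).reverse := by
  intro j
  induction j with
  | zero => intro _; simp [pvDown1]
  | succ j ih =>
    intro hj
    by_cases hm : j + 1 ≤ m
    · rw [pvDown1, if_pos hm]
      rw [List.drop_eq_nil_of_le (by simp; omega)]
      rfl
    · rw [pvDown1, if_neg hm, ih (by omega)]
      have hjl : j < a.length := by omega
      have hmj : m ≤ j := by omega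
      rw [List.take_add_one, List.getElem?_eq_getElem hjl,
        List.drop_append_of_le_length (by simpa [min_eq_left hjl.le] using hmj),
        List.reverse_append]
      simp [List.getElem?_eq_getElem hjl]

-- the second loop yields the reverse of the truncated interleave
theorem pvDown2_eq (a b : List Char) :
    ∀ j, pvDown2 a b j =
      (((List.range j).map (fun k => [a.getD k ' ', b.getD k ' '])).flatten).reverse := by
  intro j
  induction j with
  | zero => simp [pvDown2]
  | succ j ih => rw [pvDown2, ih]; simp [List.range_succ]

-- ===== VERDICT =====
theorem custom_mix_strings_spec : Claim_equal_custom_mix_strings := by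
  intro s1 s2 _
  unfold Spec_custom_mix_strings custom_mix_strings custom_mix_strings_alt
  dsimp only
  rw [PySem.List.slice?_none_none_neg_one, Option.getD_some]
  congr 1
  by_cases h : s1.toList.length = s2.toList.length
  · rw [if_pos h]; simp only [if_pos (le_of_eq h.symm)]
    rw [pv_map_range s1.toList s2.toList, pv_join_nil_flatten,
      pvDown1_eq s1.toList s2.toList.length _ le_rfl, pvDown2_eq s1.toList s2.toList,
      List.take_length, ← h, List.drop_length]
    simp
  · by_cases h2 : s2.toList.length < s1.toList.length
    · rw [if_neg h, if_pos h2]; simp only [if_pos (le_of_lt h2)]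
      rw [pv_map_range s1.toList s2.toList, pv_join_nil_flatten,
        PySem.List.slice_from_natCast,
        pvDown1_eq s1.toList s2.toList.length _ le_rfl, pvDown2_eq s1.toList s2.toList,
        List.take_length, List.reverse_append]
    · have hlt : s1.toList.length < s2.toList.length := by omega
      rw [if_neg h, if_neg h2]; simp only [if_neg (show ¬ s2.toList.length ≤ s1.toList.length by omega)]
      rw [pv_map_range s2.toList s1.toList, pv_join_nil_flatten,
        PySem.List.slice_from_natCast,
        pvDown1_eq s2.toList s1.toList.length _ le_rfl, pvDown2_eq s2.toList s1.toList,
        List.take_length, List.reverse_append]
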